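-- pv_equiv track=rewrite | github.com/spiiin/advent_of_code | 2024_21/aoc21_1.py | dir_dist
-- ===== SOURCE A (Python) =====
-- from collections import deque
--
-- dir_coords = {
--     '^': (1, 0), 'A': (2, 0),
--     '<': (0, 1), 'v': (1, 1), '>': (2, 1),
-- }
--
-- move_vec = {'^': (0, -1), 'v': (0, 1), '<': (-1, 0), '>': (1, 0)}
--
-- def dir_dist(a, b):
--     if a == b: return 0
--     pos_to_key = {v: k for k, v in dir_coords.items()}
--     start, goal = dir_coords[a], dir_coords[b]
--     q = deque([(start, 0)])
--     seen = {start}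
--     while q:
--         pos, d = q.popleft()
--         if pos == goal:
--             return d
--         for (dx, dy) in move_vec.values():
--             nxt = (pos[0] + dx, pos[1] + dy)
--             if nxt in pos_to_key and nxt not in seen:
--                 seen.add(nxt)
--                 q.append((nxt, d + 1))
--     raise RuntimeError("Unreachable on directional keypad")
-- ===== SOURCE B (Python) =====
-- dir_coords = {
--     '^': (1, 0), 'A': (2, 0),
--     '<': (0, 1), 'v': (1, 1), '>': (2, 1),
-- }
--
-- def dir_dist(a, b):
--     # Closed form: on this keypad the only gap is the corner (0,0),
--     # which never forces a detour, so BFS distance = Manhattan distance.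
--     if a == b: return 0
--     start, goal = dir_coords[a], dir_coords[b]
--     return abs(start[0] - goal[0]) + abs(start[1] - goal[1])
-- ===== Notes on version B (the rewrite author's own statement) =====
-- stated objective: simpler
-- what changed: Replaces the BFS queue/visited-set traversal with a closed-form Manhattan distance between the two key coordinates, which equals the BFS distance because the keypad's single gap at (0,0) is a corner that never lengthens a shortest path.
import Mathlib
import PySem

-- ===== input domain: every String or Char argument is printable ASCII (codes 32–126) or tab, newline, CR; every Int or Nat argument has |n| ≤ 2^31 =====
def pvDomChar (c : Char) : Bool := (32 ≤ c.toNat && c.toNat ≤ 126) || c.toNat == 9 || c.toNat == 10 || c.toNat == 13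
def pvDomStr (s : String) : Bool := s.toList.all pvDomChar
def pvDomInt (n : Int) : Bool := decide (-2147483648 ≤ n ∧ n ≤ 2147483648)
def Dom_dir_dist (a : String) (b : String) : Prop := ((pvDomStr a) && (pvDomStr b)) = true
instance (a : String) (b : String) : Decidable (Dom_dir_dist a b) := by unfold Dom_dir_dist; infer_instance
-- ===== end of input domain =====

-- B replaces A's BFS over the 5-key directional keypad with the closed-form Manhattan distance (simpler).


-- ===== PORT A =====
def pvDirCoords : PySem.Dict String (Int × Int) :=
  PySem.Dict.ofList [("^", (1, 0)), ("A", (2, 0)), ("<", (0, 1)), ("v", (1, 1)), (">", (2, 1))]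

def pvMoveVec : List (Int × Int) := [(0, -1), (0, 1), (-1, 0), (1, 0)]

-- pos_to_key = {v: k for k, v in dir_coords.items()}
def pvPosToKey : PySem.Dict (Int × Int) String :=
  pvDirCoords.items.foldl (fun d kv => d.insert kv.2 kv.1) PySem.Dict.empty

-- the BFS while-loop; fuel only makes it total (≤ 5 cells ever enter the queue, so 8 never runs out)
def pvBfs (goal : Int × Int) : Nat → List ((Int × Int) × Int) → PySem.Set (Int × Int) → Int
  | 0, _, _ => 0
  | _ + 1, [], _ => 0  -- queue empty: Python raises RuntimeError (unreachable under Pre_)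
  | fuel + 1, (pos, d) :: rest, seen =>
    if pos = goal then d
    else
      let st := pvMoveVec.foldl
        (fun (st : List ((Int × Int) × Int) × PySem.Set (Int × Int)) dv =>
          let nxt := (pos.1 + dv.1, pos.2 + dv.2)
          if pvPosToKey.contains nxt ∧ ¬ PySem.Set.contains st.2 nxt then
            (st.1 ++ [(nxt, d + 1)], PySem.Set.add st.2 nxt)
          else st)
        (rest, seen)
      pvBfs goal fuel st.1 st.2

def dir_dist (a : String) (b : String) : Int :=
  if a = b then 0
  else
    match pvDirCoords.get? a, pvDirCoords.get? b with
    | some start, some goal => pvBfs goal 8 [(start, 0)] (PySem.Set.ofList [start])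
    | _, _ => 0  -- KeyError in Python; excluded by Pre_

-- ===== PORT B =====
def pvDirCoordsB : PySem.Dict String (Int × Int) :=
  PySem.Dict.ofList [("^", (1, 0)), ("A", (2, 0)), ("<", (0, 1)), ("v", (1, 1)), (">", (2, 1))]

def dir_dist_alt (a : String) (b : String) : Int :=
  if a = b then 0
  else
    -- dict indexing: none = KeyError in Python, excluded by Pre_
    (((pvDirCoordsB.get? a).bind fun start =>
      (pvDirCoordsB.get? b).map fun goal =>
        |start.1 - goal.1| + |start.2 - goal.2|)).getD 0

-- ===== PRECONDITION & SPEC =====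
-- Pre_ excludes exactly the inputs where Python A raises: a ≠ b with a or b not a key of dir_coords (KeyError).
def Pre_dir_dist (a : String) (b : String) : Prop :=
  a = b ∨ (a ∈ ["^", "A", "<", "v", ">"] ∧ b ∈ ["^", "A", "<", "v", ">"])
instance (a : String) (b : String) : Decidable (Pre_dir_dist a b) := by
  unfold Pre_dir_dist; infer_instance

def pvWitness_dir_dist : String × String := ("<", "A")

def Spec_dir_dist (a : String) (b : String) (out : Int) : Prop := out = dir_dist_alt a b
instance (a : String) (b : String) (out : Int) : Decidable (Spec_dir_dist a b out) := by
  unfold Spec_dir_dist; infer_instance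

-- ===== CLAIM (what is proved, stated in full; the proofs are below) =====
def Claim_equal_dir_dist : Prop :=
  ∀ (a : String) (b : String), Dom_dir_dist a b → Pre_dir_dist a b → Spec_dir_dist a b (dir_dist a b)

-- ===== LEMMAS AND PROOFS =====

-- ===== VERDICT (by name: the statement is the Claim_ definition above) =====
theorem dir_dist_spec : Claim_equal_dir_dist := by
  intro a b _ hpre
  unfold Spec_dir_dist
  by_cases hab : a = b
  · simp [dir_dist, dir_dist_alt, hab]
  · rcases hpre with h | ⟨ha, hb⟩
    · exact absurd h hab
    · fin_cases ha <;> fin_cases hb <;> first | (exact absurd rfl hab) | decide
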